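-- pv_equiv track=rewrite | github.com/moongni/Algorithm | programmers/level_2/후보키.py | solution
-- ===== SOURCE A (Python) =====
-- from itertools import product
--
-- def solution(relation):
--     answer = 0
--     n_relation = len(relation)
--     n_attrs = len(relation[0])
--     cadidates = set()
--
--     for i in range(n_attrs):
--         for cadi in product(range(n_attrs), repeat=i):
--             # 최소성 확인
--             for c in cadidates:
--                 if len(c - cadi) == 0:
--                     continue
--
--             # 유일성 확인
--             unique = set()
--             for rel in relation:
--                 temp = tuple()
--                 for c in cadi:
--                     temp += (rel[c],)
--                 unique.add(temp)
--
--             if len(unique) == n_relation: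
--                 answer += 1
--
--     return answer
-- ===== SOURCE B (Python) =====
-- from itertools import product
--
-- def solution(relation):
--     n_relation = len(relation)
--     n_attrs = len(relation[0])
--     cache = {}
--     answer = 0
--     for i in range(n_attrs):
--         for cadi in product(range(n_attrs), repeat=i):
--             key = tuple(sorted(set(cadi)))
--             if key not in cache:
--                 cache[key] = len({tuple(rel[c] for c in key) for rel in relation}) == n_relation
--             if cache[key]:
--                 answer += 1
--     return answer
-- ===== Notes on version B (the rewrite author's own statement) =====
-- stated objective: faster
-- what changed: B memoizes the projection-uniqueness test in a dict keyed by the tuple's sorted set of distinct column indices (uniqueness depends only on that set), so the O(rows*len) projection-set construction runs once per distinct column set instead of once per enumerated tuple.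
import Mathlib
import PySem

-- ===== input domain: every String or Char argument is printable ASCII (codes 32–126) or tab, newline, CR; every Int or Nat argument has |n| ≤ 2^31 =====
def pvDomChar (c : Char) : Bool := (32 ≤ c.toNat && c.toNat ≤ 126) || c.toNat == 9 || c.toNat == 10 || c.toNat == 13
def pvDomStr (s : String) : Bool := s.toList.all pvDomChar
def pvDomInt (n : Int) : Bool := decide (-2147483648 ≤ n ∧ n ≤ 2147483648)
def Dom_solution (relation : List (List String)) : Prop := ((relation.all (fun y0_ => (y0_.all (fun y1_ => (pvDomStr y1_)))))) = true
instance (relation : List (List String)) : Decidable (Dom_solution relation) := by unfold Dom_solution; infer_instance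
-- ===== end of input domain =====

-- B memoizes projection-uniqueness per distinct-column-set instead of recomputing the
-- projection set for every tuple; measurably faster, same return value on all of Pre_.

-- rel[c] for a column index c (in range under Pre_)
def colVal (rel : List String) (c : Nat) : String := PySem.List.pyGetD rel (c : Int) ""

-- itertools.product(range m, repeat = i), in product order
def prodR (m : Nat) : Nat → List (List Nat)
  | 0 => [[]]
  | i + 1 => (List.range m).flatMap (fun a => (prodR m i).map (a :: ·))

-- ===== PORT A =====
-- temp = (); for c in cadi: temp += (rel[c],)
def projA (rel : List String) (cadi : List Nat) : List String :=
  cadi.foldl (fun temp c => temp ++ [colVal rel c]) []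

-- unique = set(); for rel in relation: unique.add(temp)
def uniqA (relation : List (List String)) (cadi : List Nat) : PySem.Set (List String) :=
  relation.foldl (fun u rel => PySem.Set.add u (projA rel cadi)) PySem.Set.empty

def stepA (relation : List (List String)) (answer : Int) (cadi : List Nat) : Int :=
  -- the '최소성' loop over `cadidates` is a no-op: the set stays empty
  if (uniqA relation cadi).length = relation.length then answer + 1 else answer

def solution (relation : List (List String)) : Int :=
  match PySem.List.pyGet? relation 0 with
  | none => 0  -- unreachable under Pre_: Python raises IndexError on relation == []
  | some row0 =>
    (List.range row0.length).foldl
      (fun answer i => (prodR row0.length i).foldl (stepA relation) answer) 0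

-- ===== PORT B =====
-- key = tuple(sorted(set(cadi)))
def keyOf (cadi : List Nat) : List Nat :=
  PySem.List.sorted (PySem.Set.ofList cadi) (fun x => x) false

-- len({tuple(rel[c] for c in key) for rel in relation}) == n_relation
def uniqOK (relation : List (List String)) (key : List Nat) : Bool :=
  (PySem.Set.ofList (relation.map
      (fun rel => key.map (colVal rel)))).length
    == relation.length

-- if key not in cache: cache[key] = …
def newCache (relation : List (List String)) (d : PySem.Dict (List Nat) Bool)
    (cadi : List Nat) : PySem.Dict (List Nat) Bool :=
  if d.contains (keyOf cadi) then d else d.insert (keyOf cadi) (uniqOK relation (keyOf cadi))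

def stepB (relation : List (List String))
    (st : Int × PySem.Dict (List Nat) Bool) (cadi : List Nat) :
    Int × PySem.Dict (List Nat) Bool :=
  (if (newCache relation st.2 cadi).getD (keyOf cadi) false then st.1 + 1 else st.1,
   newCache relation st.2 cadi)

def solution_alt (relation : List (List String)) : Int :=
  match PySem.List.pyGet? relation 0 with
  | none => 0  -- unreachable under Pre_: Python raises IndexError on relation == []
  | some row0 =>
    ((List.range row0.length).foldl
      (fun st i => (prodR row0.length i).foldl (stepB relation) st)
      ((0 : Int), PySem.Dict.empty)).1

-- ===== PRECONDITION & SPEC =====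
-- Pre_ excludes exactly the inputs where Python A raises IndexError: the empty relation,
-- and (when there are at least 2 attributes, so column indexing happens) a row shorter
-- than the first row.
def Pre_solution (relation : List (List String)) : Prop :=
  relation ≠ [] ∧
  (2 ≤ (relation.headD []).length →
    ∀ row ∈ relation, (relation.headD []).length ≤ row.length)
instance (relation : List (List String)) : Decidable (Pre_solution relation) := by
  unfold Pre_solution; infer_instance

def pvWitness_solution : List (List String) := [["a", "b"], ["c", "b"]]

def Spec_solution (relation : List (List String)) (out : Int) : Prop := out = solution_alt relation
instance (relation : List (List String)) (out : Int) : Decidable (Spec_solution relation out) := by unfold Spec_solution; infer_instance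

-- ===== CLAIM (what is proved, stated in full; the proofs are below) =====
def Claim_equal_solution : Prop := ∀ (relation : List (List String)), Dom_solution relation → Pre_solution relation → Spec_solution relation (solution relation)

-- ===== LEMMAS AND PROOFS =====

theorem foldl_append_map (rel : List String) :
    ∀ (cadi : List Nat) (init : List String),
      cadi.foldl (fun temp c => temp ++ [colVal rel c]) init = init ++ cadi.map (colVal rel)
  | [], init => by simp
  | c :: cs, init => by
    simp only [List.foldl_cons, List.map_cons]
    rw [foldl_append_map rel cs]
    simp

theorem projA_eq_map (rel : List String) (cadi : List Nat) :
    projA rel cadi = cadi.map (colVal rel) := by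
  unfold projA
  rw [foldl_append_map]
  simp

theorem mem_keyOf (cadi : List Nat) (j : Nat) : j ∈ keyOf cadi ↔ j ∈ cadi := by
  simp [keyOf, PySem.List.mem_sorted, PySem.Set.mem_ofList]

theorem length_add {β : Type} [BEq β] [LawfulBEq β] (s : PySem.Set β) (x : β) :
    (PySem.Set.add s x).length = if x ∈ s then s.length else s.length + 1 := by
  rw [PySem.Set.add_eq_ite]; split_ifs <;> simp

-- size of the deduplicated image depends only on the kernel of the map
theorem size_ofList_map_congr {α β : Type} [BEq β] [LawfulBEq β]
    (f g : α → β) (h : ∀ a b : α, f a = f b ↔ g a = g b) :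
    ∀ xs : List α,
      (PySem.Set.ofList (xs.map f)).length = (PySem.Set.ofList (xs.map g)).length := by
  intro xs
  induction xs using List.reverseRecOn with
  | nil => rfl
  | append_singleton xs a ih =>
    rw [List.map_append, List.map_append, List.map_singleton, List.map_singleton,
      PySem.Set.ofList_append_singleton, PySem.Set.ofList_append_singleton,
      length_add, length_add, ih]
    have hmem : (f a ∈ PySem.Set.ofList (xs.map f)) ↔ (g a ∈ PySem.Set.ofList (xs.map g)) := by
      simp only [PySem.Set.mem_ofList, List.mem_map]
      constructor
      · rintro ⟨b, hb, hfb⟩; exact ⟨b, hb, (h b a).1 hfb⟩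
      · rintro ⟨b, hb, hgb⟩; exact ⟨b, hb, (h b a).2 hgb⟩
    by_cases hf : f a ∈ PySem.Set.ofList (xs.map f)
    · rw [if_pos hf, if_pos (hmem.1 hf)]
    · rw [if_neg hf, if_neg (fun hg => hf (hmem.2 hg))]

theorem uniqA_eq_ofList (relation : List (List String)) (cadi : List Nat) :
    uniqA relation cadi
      = PySem.Set.ofList (relation.map
          (fun rel => cadi.map (colVal rel))) := by
  unfold uniqA
  rw [← PySem.Set.update_map_eq_foldl_add,
    show (PySem.Set.empty : PySem.Set (List String)) = [] from rfl,
    PySem.Set.update_nil_left]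
  simp only [projA_eq_map]

-- the memoized test over the distinct-column key agrees with A's per-tuple test
theorem uniqOK_keyOf (relation : List (List String)) (cadi : List Nat) :
    uniqOK relation (keyOf cadi)
      = decide ((uniqA relation cadi).length = relation.length) := by
  unfold uniqOK
  rw [uniqA_eq_ofList,
    size_ofList_map_congr
      (fun rel => (keyOf cadi).map (colVal rel))
      (fun rel => cadi.map (colVal rel))
      (by
        intro a b
        simp only [List.map_inj_left]
        constructor
        · intro hk j hj; exact hk j ((mem_keyOf cadi j).2 hj)
        · intro hc j hj; exact hc j ((mem_keyOf cadi j).1 hj))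
      relation]
  by_cases h :
      (PySem.Set.ofList (relation.map (fun rel => cadi.map (colVal rel)))).length
        = relation.length <;> simp [h]

def CacheOK (relation : List (List String)) (d : PySem.Dict (List Nat) Bool) : Prop :=
  ∀ k, d.contains k = true → d.getD k false = uniqOK relation k

theorem stepB_eq (relation : List (List String)) (ans : Int)
    (d : PySem.Dict (List Nat) Bool) (cadi : List Nat) (hd : CacheOK relation d) :
    (stepB relation (ans, d) cadi).1 = stepA relation ans cadi ∧
    CacheOK relation (stepB relation (ans, d) cadi).2 := by
  have hget : (newCache relation d cadi).getD (keyOf cadi) false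
      = uniqOK relation (keyOf cadi) := by
    unfold newCache
    by_cases hc : d.contains (keyOf cadi) = true
    · rw [if_pos hc]; exact hd _ hc
    · rw [if_neg hc, PySem.Dict.getD_insert_self]
  have hinv : CacheOK relation (newCache relation d cadi) := by
    unfold newCache
    by_cases hc : d.contains (keyOf cadi) = true
    · rw [if_pos hc]; exact hd
    · rw [if_neg hc]
      intro k hk
      rw [PySem.Dict.getD_insert]
      by_cases hkk : k = keyOf cadi
      · subst hkk; rw [if_pos rfl]
      · rw [if_neg hkk]
        rw [PySem.Dict.contains_insert] at hk
        simp [hkk] at hk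
        exact hd k hk
  refine ⟨?_, hinv⟩
  show (if (newCache relation d cadi).getD (keyOf cadi) false then ans + 1 else ans)
      = stepA relation ans cadi
  rw [hget, uniqOK_keyOf]
  unfold stepA
  by_cases h : (uniqA relation cadi).length = relation.length <;> simp [h]

theorem foldTuples (relation : List (List String)) :
    ∀ (L : List (List Nat)) (ans : Int) (d : PySem.Dict (List Nat) Bool),
      CacheOK relation d →
      (L.foldl (stepB relation) (ans, d)).1 = L.foldl (stepA relation) ans ∧
      CacheOK relation (L.foldl (stepB relation) (ans, d)).2 := by
  intro L
  induction L with
  | nil => intro ans d hd; exact ⟨rfl, hd⟩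
  | cons c L ih =>
    intro ans d hd
    obtain ⟨h1, h2⟩ := stepB_eq relation ans d c hd
    simp only [List.foldl_cons]
    have : stepB relation (ans, d) c
        = ((stepB relation (ans, d) c).1, (stepB relation (ans, d) c).2) := rfl
    rw [this, h1]
    exact ih _ _ h2

theorem foldOuter (relation : List (List String)) (m : Nat) :
    ∀ (Is : List Nat) (ans : Int) (d : PySem.Dict (List Nat) Bool),
      CacheOK relation d →
      (Is.foldl (fun st i => (prodR m i).foldl (stepB relation) st) (ans, d)).1
        = Is.foldl (fun a i => (prodR m i).foldl (stepA relation) a) ans ∧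
      CacheOK relation
        (Is.foldl (fun st i => (prodR m i).foldl (stepB relation) st) (ans, d)).2 := by
  intro Is
  induction Is with
  | nil => intro ans d hd; exact ⟨rfl, hd⟩
  | cons i Is ih =>
    intro ans d hd
    obtain ⟨h1, h2⟩ := foldTuples relation (prodR m i) ans d hd
    simp only [List.foldl_cons]
    have : (prodR m i).foldl (stepB relation) (ans, d)
        = (((prodR m i).foldl (stepB relation) (ans, d)).1,
           ((prodR m i).foldl (stepB relation) (ans, d)).2) := rfl
    rw [this, h1]
    exact ih _ _ h2

-- ===== VERDICT (by name: the statement is the Claim_ definition above) =====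
theorem solution_spec : Claim_equal_solution := by
  intro relation _ _
  unfold Spec_solution solution solution_alt
  match h : PySem.List.pyGet? relation 0 with
  | none => rfl
  | some row0 =>
    exact ((foldOuter relation row0.length (List.range row0.length) 0 PySem.Dict.empty
      (by intro k hk; simp [PySem.Dict.contains_empty] at hk)).1).symm
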